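-- pv_equiv track=rewrite | github.com/riccardobaleani07-cloud/dnd-stuff | NPC generator/npc_generation/NPC_generator_yay.py | infer_alignment_from_personality
-- ===== SOURCE A (Python) =====
-- def infer_alignment_from_personality(traits, good_traits, evil_traits, lawful_traits, chaotic_traits):
--
--     #Good is counted as positive, Evil as negative
--     good_evil_score = 0
--     for trait in traits:
--         if trait in good_traits:
--             good_evil_score += 1
--         elif trait in evil_traits:
--             good_evil_score -= 1
--
--     #Lawful is counted as positive, Chaotic as negative
--     lawful_chaotic_score = 0
--     for trait in traits:
--         if trait in lawful_traits:
--             lawful_chaotic_score += 1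
--         elif trait in chaotic_traits:
--             lawful_chaotic_score -= 1
--
--     # Determine alignment based on scores
--     if good_evil_score > 0:
--         alignment = "Good"
--     elif good_evil_score < 0:
--         alignment = "Evil"
--     else:
--         alignment = "Neutral"
--
--     if lawful_chaotic_score > 0:
--         alignment = f"Lawful {alignment}"
--     elif lawful_chaotic_score < 0:
--         alignment = f"Chaotic {alignment}"
--     else:
--         if alignment == "Neutral":
--             alignment = "True Neutral"
--             #Special case for pure neutral
--         else:
--             alignment = f"Neutral {alignment}"
--
--
--     return alignment
-- ===== SOURCE B (Python) =====
-- def infer_alignment_from_personality(traits, good_traits, evil_traits, lawful_traits, chaotic_traits):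
--     # Inverted traversal: instead of scanning traits and testing membership per
--     # trait, iterate over the distinct category members and count their
--     # occurrences in traits (elif = the negative category minus the positive one).
--     def axis_score(pos, neg):
--         pos_set = set(pos)
--         return (sum(traits.count(x) for x in pos_set)
--                 - sum(traits.count(x) for x in set(neg) - pos_set))
--
--     ge = axis_score(good_traits, evil_traits)
--     lc = axis_score(lawful_traits, chaotic_traits)
--     base = "Good" if ge > 0 else "Evil" if ge < 0 else "Neutral"
--     if lc:
--         return ("Lawful " if lc > 0 else "Chaotic ") + base
--     return "True Neutral" if base == "Neutral" else "Neutral " + base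
-- ===== Notes on version B (the rewrite author's own statement) =====
-- stated objective: alternative
-- what changed: B inverts the traversal: it deduplicates each category into a set and sums traits.count(x) over the positive set minus over (negative set - positive set), instead of A's two scans over traits with per-trait membership tests; the staged f-string decision tree becomes a direct expression.
import Mathlib
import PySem

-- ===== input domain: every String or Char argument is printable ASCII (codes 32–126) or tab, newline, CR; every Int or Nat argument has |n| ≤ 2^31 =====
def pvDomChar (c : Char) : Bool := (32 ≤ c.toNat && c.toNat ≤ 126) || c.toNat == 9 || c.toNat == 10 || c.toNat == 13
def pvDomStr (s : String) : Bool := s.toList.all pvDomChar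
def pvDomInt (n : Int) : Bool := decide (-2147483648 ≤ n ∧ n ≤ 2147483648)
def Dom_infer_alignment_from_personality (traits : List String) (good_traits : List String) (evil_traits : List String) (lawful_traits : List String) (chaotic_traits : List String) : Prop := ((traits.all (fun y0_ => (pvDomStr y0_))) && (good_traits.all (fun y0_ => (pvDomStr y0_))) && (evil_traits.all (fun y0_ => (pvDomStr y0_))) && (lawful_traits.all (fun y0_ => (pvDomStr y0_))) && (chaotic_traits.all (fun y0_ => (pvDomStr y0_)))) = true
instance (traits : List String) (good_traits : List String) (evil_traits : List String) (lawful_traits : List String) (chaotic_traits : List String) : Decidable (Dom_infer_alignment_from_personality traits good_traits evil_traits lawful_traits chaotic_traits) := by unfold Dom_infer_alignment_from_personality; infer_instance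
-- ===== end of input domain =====

-- B inverts the traversal (counts occurrences of each distinct category member in traits
-- instead of scanning traits with membership tests) and flattens the staged string build
-- into a direct expression (objective: alternative, same cost).

-- ===== PORT A =====
def infer_alignment_from_personality (traits : List String) (good_traits : List String) (evil_traits : List String) (lawful_traits : List String) (chaotic_traits : List String) : String :=
  let good_evil_score : Int := traits.foldl (fun s trait =>
    if good_traits.contains trait then s + 1
    else if evil_traits.contains trait then s - 1
    else s) 0
  let lawful_chaotic_score : Int := traits.foldl (fun s trait =>
    if lawful_traits.contains trait then s + 1
    else if chaotic_traits.contains trait then s - 1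
    else s) 0
  let alignment : String :=
    if good_evil_score > 0 then "Good"
    else if good_evil_score < 0 then "Evil"
    else "Neutral"
  if lawful_chaotic_score > 0 then "Lawful " ++ alignment
  else if lawful_chaotic_score < 0 then "Chaotic " ++ alignment
  else if alignment == "Neutral" then "True Neutral"
  else "Neutral " ++ alignment

-- ===== PORT B =====
-- axis_score: sum of traits.count(x) over set(pos), minus over set(neg) - set(pos)
def pvAxisScore (traits : List String) (pos : List String) (neg : List String) : Int :=
  let pos_set : PySem.Set String := PySem.Set.ofList pos
  ((pos_set.map (fun x => (PySem.List.count traits x : Int))).sum)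
    - (((PySem.Set.diff (PySem.Set.ofList neg) pos_set).map (fun x => (PySem.List.count traits x : Int))).sum)

def infer_alignment_from_personality_alt (traits : List String) (good_traits : List String) (evil_traits : List String) (lawful_traits : List String) (chaotic_traits : List String) : String :=
  let ge : Int := pvAxisScore traits good_traits evil_traits
  let lc : Int := pvAxisScore traits lawful_traits chaotic_traits
  let base : String := if ge > 0 then "Good" else if ge < 0 then "Evil" else "Neutral"
  if lc ≠ 0 then (if lc > 0 then "Lawful " else "Chaotic ") ++ base
  else if base == "Neutral" then "True Neutral"
  else "Neutral " ++ base

-- ===== PRECONDITION & SPEC =====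
def Spec_infer_alignment_from_personality (traits : List String) (good_traits : List String) (evil_traits : List String) (lawful_traits : List String) (chaotic_traits : List String) (out : String) : Prop := out = infer_alignment_from_personality_alt traits good_traits evil_traits lawful_traits chaotic_traits
instance (traits : List String) (good_traits : List String) (evil_traits : List String) (lawful_traits : List String) (chaotic_traits : List String) (out : String) : Decidable (Spec_infer_alignment_from_personality traits good_traits evil_traits lawful_traits chaotic_traits out) := by unfold Spec_infer_alignment_from_personality; infer_instance

-- ===== CLAIM =====
def Claim_equal_infer_alignment_from_personality : Prop := ∀ (traits : List String) (good_traits : List String) (evil_traits : List String) (lawful_traits : List String) (chaotic_traits : List String), Dom_infer_alignment_from_personality traits good_traits evil_traits lawful_traits chaotic_traits → Spec_infer_alignment_from_personality traits good_traits evil_traits lawful_traits chaotic_traits (infer_alignment_from_personality traits good_traits evil_traits lawful_traits chaotic_traits)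

-- ===== LEMMAS AND PROOFS =====

-- adding a fresh element x to the membership predicate adds count ts x occurrences
theorem countP_cons_mem (x : String) (S ts : List String) (hx : x ∉ S) :
    ts.countP (fun t => decide (t = x) || decide (t ∈ S))
      = ts.count x + ts.countP (fun t => decide (t ∈ S)) := by
  induction ts with
  | nil => simp
  | cons t ts ih =>
    by_cases h1 : t = x
    · subst h1
      simp [hx, ih]
      omega
    · simp [List.countP_cons, h1, ih]
      omega

-- summing counts over a duplicate-free index list is counting membership over ts
theorem sum_count_nodup (ts : List String) (S : List String) (h : S.Nodup) :
    (S.map (fun x => (PySem.List.count ts x : Int))).sum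
      = (ts.countP (fun t => decide (t ∈ S)) : Int) := by
  induction S with
  | nil => simp
  | cons x S ih =>
    rcases List.nodup_cons.mp h with ⟨hx, hS⟩
    have hc : ts.countP (fun t => decide (t ∈ x :: S))
        = ts.countP (fun t => decide (t = x) || decide (t ∈ S)) := by
      apply List.countP_congr; intro t _; simp [List.mem_cons]
    rw [List.map_cons, List.sum_cons, ih hS, hc, countP_cons_mem x S ts hx,
        PySem.List.count_eq]
    push_cast
    ring

-- A's if/elif fold characterised by two membership counts
theorem foldA_char (G E ts : List String) (a : Int) :
    ts.foldl (fun s t => if G.contains t then s + 1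
                         else if E.contains t then s - 1 else s) a
      = a + (ts.countP (fun t => decide (t ∈ G)) : Int)
          - (ts.countP (fun t => decide (t ∈ E ∧ t ∉ G)) : Int) := by
  induction ts generalizing a with
  | nil => simp
  | cons t ts ih =>
    rw [List.foldl_cons, ih]
    by_cases h1 : t ∈ G <;> by_cases h2 : t ∈ E <;>
      simp [h1, h2] <;> ring

-- B's axis score equals the same two membership counts
theorem axis_char (ts G E : List String) :
    pvAxisScore ts G E
      = (ts.countP (fun t => decide (t ∈ G)) : Int)
          - (ts.countP (fun t => decide (t ∈ E ∧ t ∉ G)) : Int) := by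
  simp only [pvAxisScore]
  rw [sum_count_nodup ts _ (PySem.Set.nodup_ofList G),
      sum_count_nodup ts _ (PySem.Set.nodup_diff _ _ (PySem.Set.nodup_ofList E))]
  congr 2
  · apply List.countP_congr; intro t _
    simp [PySem.Set.mem_ofList]
  · apply List.countP_congr; intro t _
    simp [PySem.Set.mem_diff, PySem.Set.mem_ofList]

-- the two final string constructions agree for equal scores
theorem final_eq (ge lc : Int) :
    (let alignment : String := if ge > 0 then "Good" else if ge < 0 then "Evil" else "Neutral"
     if lc > 0 then "Lawful " ++ alignment
     else if lc < 0 then "Chaotic " ++ alignment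
     else if alignment == "Neutral" then "True Neutral"
     else "Neutral " ++ alignment)
    = (let base : String := if ge > 0 then "Good" else if ge < 0 then "Evil" else "Neutral"
       if lc ≠ 0 then (if lc > 0 then "Lawful " else "Chaotic ") ++ base
       else if base == "Neutral" then "True Neutral"
       else "Neutral " ++ base) := by
  rcases lt_trichotomy lc 0 with h | h | h
  · simp [h, lt_asymm h, ne_of_lt h]
  · subst h; simp
  · simp [h, ne_of_gt h]

-- ===== VERDICT =====
theorem infer_alignment_from_personality_spec : Claim_equal_infer_alignment_from_personality := by
  intro traits good_traits evil_traits lawful_traits chaotic_traits _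
  unfold Spec_infer_alignment_from_personality
  unfold infer_alignment_from_personality infer_alignment_from_personality_alt
  rw [axis_char, axis_char, foldA_char, foldA_char]
  simpa using final_eq
    ((traits.countP (fun t => decide (t ∈ good_traits)) : Int)
      - (traits.countP (fun t => decide (t ∈ evil_traits ∧ t ∉ good_traits)) : Int))
    ((traits.countP (fun t => decide (t ∈ lawful_traits)) : Int)
      - (traits.countP (fun t => decide (t ∈ chaotic_traits ∧ t ∉ lawful_traits)) : Int))
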